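-- pv_equiv track=rewrite | github.com/artAHAHA/PythonTasks | Task3/find_max_containing_rectangle.py | find_max_containing_rectangle
-- ===== SOURCE A (Python) =====
-- def is_inside(rect_a, rect_b):
--     (ax1, ay1), (ax2, ay2) = rect_a
--     (bx1, by1), (bx2, by2) = rect_b
--
--     ax_min, ax_max = min(ax1, ax2), max(ax1, ax2)
--     ay_min, ay_max = min(ay1, ay2), max(ay1, ay2)
--
--     bx_min, bx_max = min(bx1, bx2), max(bx1, bx2)
--     by_min, by_max = min(by1, by2), max(by1, by2)
--
--     return (ax_min >= bx_min and ax_max <= bx_max and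
--             ay_min >= by_min and ay_max <= by_max)
--
-- def rectangle_area(rect):
--     (x1, y1), (x2, y2) = rect
--     return abs(x2 - x1) * abs(y2 - y1)
--
-- def find_max_containing_rectangle(rectangles):
--     max_count = -1
--     best_rectangle = None
--
--     for i, rect in enumerate(rectangles):
--         count = 0
--         for j, other_rect in enumerate(rectangles):
--             if i != j and is_inside(other_rect, rect):
--                 count += 1
--
--         if count > max_count:
--             max_count = count
--             best_rectangle = rect
--
--         elif count == max_count:
--             if rectangle_area(rect) > rectangle_area(best_rectangle):
--                 best_rectangle = rect
--
--     return best_rectangle, max_count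
-- ===== SOURCE B (Python) =====
-- def find_max_containing_rectangle(rectangles):
--     # Stage 1: group identical shapes once - multiplicity per normalized rectangle.
--     mult = {}
--     for (x1, y1), (x2, y2) in rectangles:
--         k = (min(x1, x2), max(x1, x2), min(y1, y2), max(y1, y2))
--         mult[k] = mult.get(k, 0) + 1
--     # Stage 2: containment count per DISTINCT shape, weighted by multiplicity
--     # (each shape contains itself, so subtract 1 for the rectangle's own copy).
--     cnt = {}
--     for a in mult.keys():
--         total = 0
--         for b, m in mult.items():
--             if a[0] <= b[0] and b[1] <= a[1] and a[2] <= b[2] and b[3] <= a[3]: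
--                 total += m
--         cnt[a] = total - 1
--     # Stage 3: replay the original order for the (count, then strictly larger area) tie-break.
--     best, best_c, best_a = None, -1, -1
--     for r in rectangles:
--         (x1, y1), (x2, y2) = r
--         k = (min(x1, x2), max(x1, x2), min(y1, y2), max(y1, y2))
--         c = cnt[k]
--         ar = (k[1] - k[0]) * (k[3] - k[2])
--         if c > best_c or (c == best_c and ar > best_a):
--             best, best_c, best_a = r, c, ar
--     return best, best_c
-- ===== Notes on version B (the rewrite author's own statement) =====
-- stated objective: faster
-- what changed: B replaces A's O(n^2) all-pairs scan by three staged passes: a counter dict groups identical normalized shapes once, containment is then counted only between DISTINCT shapes weighted by multiplicity (O(n + k^2) for k distinct shapes), and a final linear replay of the original order applies the (count, then strictly larger area) tie-break.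
import Mathlib
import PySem

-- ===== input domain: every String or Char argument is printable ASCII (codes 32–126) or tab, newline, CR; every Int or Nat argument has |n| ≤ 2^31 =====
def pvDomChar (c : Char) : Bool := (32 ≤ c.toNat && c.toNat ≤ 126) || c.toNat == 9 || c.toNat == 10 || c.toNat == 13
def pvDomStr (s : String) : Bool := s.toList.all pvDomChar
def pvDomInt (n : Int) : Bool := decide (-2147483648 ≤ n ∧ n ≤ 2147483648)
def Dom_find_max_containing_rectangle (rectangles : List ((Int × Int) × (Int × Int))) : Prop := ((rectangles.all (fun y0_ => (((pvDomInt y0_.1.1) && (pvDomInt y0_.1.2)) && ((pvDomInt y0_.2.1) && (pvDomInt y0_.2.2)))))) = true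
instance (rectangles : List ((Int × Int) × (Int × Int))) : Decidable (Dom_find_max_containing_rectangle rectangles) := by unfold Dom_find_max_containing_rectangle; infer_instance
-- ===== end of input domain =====

-- B groups identical normalized shapes in a counter dict built once, counts containment
-- between DISTINCT shapes weighted by multiplicity (O(n + k^2), k = distinct shapes,
-- instead of A's O(n^2) pairwise scan), then replays the original order for the tie-break.

-- ===== PORT A =====
def is_inside (rect_a rect_b : (Int × Int) × (Int × Int)) : Bool :=
  let ((ax1, ay1), (ax2, ay2)) := rect_a
  let ((bx1, by1), (bx2, by2)) := rect_b
  let ax_min := min ax1 ax2; let ax_max := max ax1 ax2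
  let ay_min := min ay1 ay2; let ay_max := max ay1 ay2
  let bx_min := min bx1 bx2; let bx_max := max bx1 bx2
  let by_min := min by1 by2; let by_max := max by1 by2
  decide (ax_min ≥ bx_min ∧ ax_max ≤ bx_max ∧ ay_min ≥ by_min ∧ ay_max ≤ by_max)

def rectangle_area (rect : (Int × Int) × (Int × Int)) : Int :=
  let ((x1, y1), (x2, y2)) := rect
  |x2 - x1| * |y2 - y1|

def find_max_containing_rectangle (rectangles : List ((Int × Int) × (Int × Int))) : (Option ((Int × Int) × (Int × Int))) × Int :=
  let st := (PySem.List.enumerate rectangles).foldl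
    (fun (st : Int × Option ((Int × Int) × (Int × Int))) ir =>
      let count := (PySem.List.enumerate rectangles).foldl
        (fun (c : Int) jo => if (ir.1 != jo.1) && is_inside jo.2 ir.2 then c + 1 else c) 0
      if count > st.1 then (count, some ir.2)
      else if count = st.1 then
        -- best_rectangle is never None when this branch runs; the none case is dead code
        match st.2 with
        | some b => if rectangle_area ir.2 > rectangle_area b then (st.1, some ir.2) else st
        | none => st
      else st)
    (-1, none)
  (st.2, st.1)

-- ===== PORT B =====
def pvNorm (rect : (Int × Int) × (Int × Int)) : Int × Int × Int × Int :=
  let ((x1, y1), (x2, y2)) := rect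
  (min x1 x2, max x1 x2, min y1 y2, max y1 y2)

def pvContains (a b : Int × Int × Int × Int) : Bool :=
  decide (a.1 ≤ b.1 ∧ b.2.1 ≤ a.2.1 ∧ a.2.2.1 ≤ b.2.2.1 ∧ b.2.2.2 ≤ a.2.2.2)

def find_max_containing_rectangle_alt (rectangles : List ((Int × Int) × (Int × Int))) : (Option ((Int × Int) × (Int × Int))) × Int :=
  -- Stage 1: multiplicity per normalized shape
  let mult : PySem.Dict (Int × Int × Int × Int) Int :=
    rectangles.foldl (fun d r => let k := pvNorm r; d.insert k (d.getD k 0 + 1)) PySem.Dict.empty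
  -- Stage 2: containment count per DISTINCT shape, weighted by multiplicity
  let cnt : PySem.Dict (Int × Int × Int × Int) Int :=
    mult.keys.foldl (fun c a =>
      let total := mult.items.foldl (fun (t : Int) bm =>
        if pvContains a bm.1 then t + bm.2 else t) 0
      c.insert a (total - 1)) PySem.Dict.empty
  -- Stage 3: replay the original order for the (count, then strictly larger area) tie-break
  let st := rectangles.foldl
    (fun (st : Option ((Int × Int) × (Int × Int)) × Int × Int) r =>
      let k := pvNorm r
      let c := cnt.getD k 0   -- k is always a key of cnt, so Python's cnt[k] never raises
      let ar := (k.2.1 - k.1) * (k.2.2.2 - k.2.2.1)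
      if c > st.2.1 ∨ (c = st.2.1 ∧ ar > st.2.2) then (some r, c, ar) else st)
    (none, -1, -1)
  (st.1, st.2.1)

-- ===== PRECONDITION & SPEC =====
def Spec_find_max_containing_rectangle (rectangles : List ((Int × Int) × (Int × Int))) (out : (Option ((Int × Int) × (Int × Int))) × Int) : Prop := out = find_max_containing_rectangle_alt rectangles
instance (rectangles : List ((Int × Int) × (Int × Int))) (out : (Option ((Int × Int) × (Int × Int))) × Int) : Decidable (Spec_find_max_containing_rectangle rectangles out) := by unfold Spec_find_max_containing_rectangle; infer_instance

-- ===== CLAIM (what is proved, stated in full; the proofs are below) =====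
def Claim_equal_find_max_containing_rectangle : Prop := ∀ (rectangles : List ((Int × Int) × (Int × Int))), Dom_find_max_containing_rectangle rectangles → Spec_find_max_containing_rectangle rectangles (find_max_containing_rectangle rectangles)

-- ===== LEMMAS AND PROOFS =====

-- x lies inside r  ⟺  the normalized r contains the normalized x
lemma is_inside_eq (x r : (Int × Int) × (Int × Int)) :
    is_inside x r = pvContains (pvNorm r) (pvNorm x) := by
  obtain ⟨⟨x1, y1⟩, x2, y2⟩ := x
  obtain ⟨⟨u1, v1⟩, u2, v2⟩ := r
  simp only [is_inside, pvContains, pvNorm, decide_eq_decide, ge_iff_le]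

-- normalized area
def pvArea (a : Int × Int × Int × Int) : Int :=
  (a.2.1 - a.1) * (a.2.2.2 - a.2.2.1)

lemma area_eq (r : (Int × Int) × (Int × Int)) :
    rectangle_area r = pvArea (pvNorm r) := by
  obtain ⟨⟨x1, y1⟩, x2, y2⟩ := r
  simp only [rectangle_area, pvArea, pvNorm]
  rw [max_sub_min_eq_abs, max_sub_min_eq_abs]

-- the common count: containments of elements of rs in r, r itself excluded
def pvCnt (rs : List ((Int × Int) × (Int × Int))) (r : (Int × Int) × (Int × Int)) : Int :=
  ((rs.map pvNorm).countP (fun b => pvContains (pvNorm r) b) : Int) - 1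

lemma contains_self (a : Int × Int × Int × Int) : pvContains a a = true := by
  simp [pvContains]

lemma mem_enumerate_lb {α : Type} {rs : List α} {k i : Int} {r : α}
    (h : (i, r) ∈ PySem.List.enumerate rs k) : k ≤ i := by
  induction rs generalizing k with
  | nil => simp [PySem.List.enumerate] at h
  | cons x t ih =>
    rw [PySem.List.enumerate_cons] at h
    rcases List.mem_cons.mp h with h | h
    · simp at h; omega
    · have := ih h; omega

lemma countP_enumerate_snd {α : Type} (Q : α → Bool) (rs : List α) (k : Int) :
    (PySem.List.enumerate rs k).countP (fun jo => Q jo.2) = rs.countP Q := by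
  induction rs generalizing k with
  | nil => simp [PySem.List.enumerate]
  | cons x t ih => simp [PySem.List.enumerate_cons, List.countP_cons, ih]

-- A's inner count over enumerate equals "count everything, subtract one"
lemma count_enum {α : Type} (Q : α → Bool) (rs : List α) (k i : Int) (r : α)
    (hmem : (i, r) ∈ PySem.List.enumerate rs k) (hQr : Q r = true) :
    ((PySem.List.enumerate rs k).countP (fun jo => (i != jo.1) && Q jo.2) : Int)
      = (rs.countP Q : Int) - 1 := by
  induction rs generalizing k with
  | nil => simp [PySem.List.enumerate] at hmem
  | cons x t ih =>
    rw [PySem.List.enumerate_cons] at hmem ⊢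
    rcases List.mem_cons.mp hmem with h | h
    · simp only [Prod.mk.injEq] at h
      obtain ⟨hi, hr⟩ := h
      subst hi; subst hr
      have htail : (PySem.List.enumerate t (i + 1)).countP (fun jo => (i != jo.1) && Q jo.2)
          = (PySem.List.enumerate t (i + 1)).countP (fun jo => Q jo.2) := by
        apply List.countP_congr
        intro jo hjo
        have hlb : i + 1 ≤ jo.1 := mem_enumerate_lb (by simpa using hjo)
        have hne : (i != jo.1) = true := by simp only [bne_iff_ne, ne_eq]; omega
        simp [hne]
      rw [List.countP_cons, List.countP_cons, htail, countP_enumerate_snd]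
      simp only [hQr, bne_self_eq_false, Bool.and_true]
      push_cast
      omega
    · have hlb : k + 1 ≤ i := mem_enumerate_lb h
      have hik : (i != k) = true := by simp only [bne_iff_ne, ne_eq]; omega
      have hih := ih (k + 1) h
      rw [List.countP_cons, List.countP_cons]
      push_cast at hih ⊢
      cases hQx : Q x <;> simp [hik] <;> omega

-- first-argmax selection as a plain fold
def pvStep2 {α : Type} (k1 k2 : α → Int) (m x : α) : α :=
  if k1 m < k1 x ∨ (¬ k1 x < k1 m ∧ k2 m < k2 x) then x else m

-- A's loop body, as a named function of the two key functions
def pvStepA {α : Type} (k1 k2 : α → Int) (st : Int × Option α) (x : α) : Int × Option α :=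
  if k1 x > st.1 then (k1 x, some x)
  else if k1 x = st.1 then
    match st.2 with
    | some m => if k2 x > k2 m then (st.1, some x) else st
    | none => st
  else st

-- A's running (max_count, best) fold computes the running first-argmax
lemma runA {α : Type} (k1 k2 : α → Int) (xs : List α) (b : α) :
    xs.foldl (pvStepA k1 k2) (k1 b, some b)
    = (k1 (xs.foldl (pvStep2 k1 k2) b), some (xs.foldl (pvStep2 k1 k2) b)) := by
  induction xs generalizing b with
  | nil => rfl
  | cons x t ih =>
    rw [List.foldl_cons, List.foldl_cons]
    have hstep : pvStepA k1 k2 (k1 b, some b) x = (k1 (pvStep2 k1 k2 b x), some (pvStep2 k1 k2 b x)) := by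
      simp only [pvStepA, pvStep2, gt_iff_lt]
      rcases lt_trichotomy (k1 b) (k1 x) with h1 | h1 | h1
      · rw [if_pos h1, if_pos (Or.inl h1)]
      · rw [if_neg (by omega), if_pos h1.symm]
        by_cases h3 : k2 b < k2 x
        · rw [if_pos h3, if_pos (Or.inr ⟨by omega, h3⟩)]
          rw [h1]
        · rw [if_neg h3, if_neg (by omega)]
      · rw [if_neg (by omega), if_neg (by omega), if_neg (by omega)]
    rw [hstep, ih]

-- B's replay-loop body, as a named function of the two key functions
def pvStepB {α : Type} (k1 k2 : α → Int) (st : Option α × Int × Int) (x : α) : Option α × Int × Int :=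
  if k1 x > st.2.1 ∨ (k1 x = st.2.1 ∧ k2 x > st.2.2) then (some x, k1 x, k2 x) else st

-- B's running (best, best_c, best_a) fold computes the same running first-argmax
lemma runB {α : Type} (k1 k2 : α → Int) (xs : List α) (b : α) :
    xs.foldl (pvStepB k1 k2) (some b, k1 b, k2 b)
    = (some (xs.foldl (pvStep2 k1 k2) b), k1 (xs.foldl (pvStep2 k1 k2) b), k2 (xs.foldl (pvStep2 k1 k2) b)) := by
  induction xs generalizing b with
  | nil => rfl
  | cons x t ih =>
    rw [List.foldl_cons, List.foldl_cons]
    have hstep : pvStepB k1 k2 (some b, k1 b, k2 b) x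
        = (some (pvStep2 k1 k2 b x), k1 (pvStep2 k1 k2 b x), k2 (pvStep2 k1 k2 b x)) := by
      simp only [pvStepB, pvStep2, gt_iff_lt]
      have hiff : (k1 b < k1 x ∨ (k1 x = k1 b ∧ k2 b < k2 x))
          ↔ (k1 b < k1 x ∨ (¬ k1 x < k1 b ∧ k2 b < k2 x)) := by omega
      by_cases hc : k1 b < k1 x ∨ (¬ k1 x < k1 b ∧ k2 b < k2 x)
      · rw [if_pos (hiff.mpr hc), if_pos hc]
      · rw [if_neg (fun h => hc (hiff.mp h)), if_neg hc]
    rw [hstep, ih]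

-- fold over enumerate with a step that ignores the index = fold over the list
lemma foldl_enumerate_snd {α β : Type} (f : β → α → β) (init : β) (rs : List α) (k : Int) :
    (PySem.List.enumerate rs k).foldl (fun acc p => f acc p.2) init = rs.foldl f init := by
  induction rs generalizing k init with
  | nil => rfl
  | cons x t ih => rw [PySem.List.enumerate_cons, List.foldl_cons, List.foldl_cons, ih]

-- counts split at one value: countP = (hits at k) + countP on the rest
lemma countP_split {κ : Type} [BEq κ] [LawfulBEq κ] (P : κ → Bool) (k : κ) (l : List κ) :
    (l.countP P : Int)
      = (if P k then (l.count k : Int) else 0)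
        + ((l.filter (fun y => !(y == k))).countP P : Int) := by
  induction l with
  | nil => simp
  | cons y t ih =>
    by_cases hy : y = k
    · subst hy
      simp only [List.countP_cons, List.count_cons, List.filter_cons]
      cases hP : P y <;> simp [hP] at ih ⊢ <;> omega
    · simp only [List.countP_cons, List.count_cons, List.filter_cons]
      have hbk : (y == k) = false := by simp [hy]
      cases hP : P y <;> simp [hP, hbk] at ih ⊢ <;> omega

-- multiplicity-weighted sum over the distinct values = plain countP
lemma sum_count {κ : Type} [BEq κ] [LawfulBEq κ] (P : κ → Bool) (ks l : List κ)
    (hnd : ks.Nodup) (hsub : ∀ x ∈ l, x ∈ ks) :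
    (ks.map (fun k => if P k then (l.count k : Int) else 0)).sum = (l.countP P : Int) := by
  induction ks generalizing l with
  | nil =>
    have : l = [] := List.eq_nil_iff_forall_not_mem.mpr (fun x hx => by simpa using hsub x hx)
    simp [this]
  | cons k ks' ih =>
    rw [List.map_cons, List.sum_cons]
    have hnd' := hnd
    rw [List.nodup_cons] at hnd'
    have hmap : ks'.map (fun a => if P a then (l.count a : Int) else 0)
        = ks'.map (fun a => if P a then ((l.filter (fun y => !(y == k))).count a : Int) else 0) := by
      apply List.map_congr_left
      intro a ha
      have hak : a ≠ k := fun h => hnd'.1 (h ▸ ha)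
      rw [List.count_filter (by simp [hak])]
    rw [hmap, ih (l.filter (fun y => !(y == k))) hnd'.2
      (fun x hx => by
        have hxl := List.mem_of_mem_filter hx
        have hxk : x ≠ k := by
          have := List.of_mem_filter hx
          simpa using this
        rcases List.mem_cons.mp (hsub x hxl) with h | h
        · exact absurd h hxk
        · exact h)]
    exact (countP_split P k l).symm

-- Stage-2 inner loop: the multiplicity-weighted total over the counter's items
-- is the plain containment count over all normalized rectangles
lemma total_eq (ns : List (Int × Int × Int × Int)) (a : Int × Int × Int × Int) :
    (PySem.Dict.counter ns).items.foldl
      (fun (t : Int) bm => if pvContains a bm.1 then t + bm.2 else t) 0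
    = (ns.countP (fun b => pvContains a b) : Int) := by
  rw [PySem.Dict.items_counter, List.foldl_map]
  have hfn : (fun (t : Int) (k : Int × Int × Int × Int) =>
        if pvContains a k then t + (ns.count k : Int) else t)
      = (fun (t : Int) k => t + if pvContains a k then (ns.count k : Int) else 0) := by
    funext t k; split <;> simp
  simp only [hfn]
  rw [PySem.List.foldl_add, zero_add]
  exact sum_count (fun b => pvContains a b) (PySem.Set.ofList ns) ns
    (PySem.Set.nodup_ofList ns) (fun x hx => (PySem.Set.mem_ofList ns x).mpr hx)

-- Stage-2 dict: its items list pairs every distinct shape with its count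
lemma cnt_items (rs : List ((Int × Int) × (Int × Int))) :
    ((PySem.Dict.counter (rs.map pvNorm)).keys.foldl
      (fun c a => c.insert a
        ((PySem.Dict.counter (rs.map pvNorm)).items.foldl
          (fun (t : Int) bm => if pvContains a bm.1 then t + bm.2 else t) 0 - 1))
      PySem.Dict.empty).items
    = (PySem.Set.ofList (rs.map pvNorm)).map
        (fun a => (a, ((rs.map pvNorm).countP (fun b => pvContains a b) : Int) - 1)) := by
  have h := PySem.Dict.items_foldl_insert_fresh
    ((PySem.Dict.counter (rs.map pvNorm)).keys)
    (fun (a : Int × Int × Int × Int) => a)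
    (fun a => (PySem.Dict.counter (rs.map pvNorm)).items.foldl
        (fun (t : Int) bm => if pvContains a bm.1 then t + bm.2 else t) 0 - 1)
    PySem.Dict.empty
    (fun a _ => PySem.Dict.contains_empty a)
    (by rw [List.map_id']; exact PySem.Dict.nodup_keys_counter (rs.map pvNorm))
  refine Eq.trans h ?_
  rw [PySem.Dict.keys_counter]
  show [] ++ _ = _
  rw [List.nil_append]
  apply List.map_congr_left
  intro a _
  simp only [total_eq]

-- Stage-3 lookup: cnt[pvNorm r] is exactly pvCnt rs r
lemma cnt_getD (rs : List ((Int × Int) × (Int × Int))) (r : (Int × Int) × (Int × Int))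
    (hr : r ∈ rs) :
    ((PySem.Dict.counter (rs.map pvNorm)).keys.foldl
      (fun c a => c.insert a
        ((PySem.Dict.counter (rs.map pvNorm)).items.foldl
          (fun (t : Int) bm => if pvContains a bm.1 then t + bm.2 else t) 0 - 1))
      PySem.Dict.empty).getD (pvNorm r) 0 = pvCnt rs r := by
  have hitems := cnt_items rs
  have hkeys : ((PySem.Dict.counter (rs.map pvNorm)).keys.foldl
      (fun c a => c.insert a
        ((PySem.Dict.counter (rs.map pvNorm)).items.foldl
          (fun (t : Int) bm => if pvContains a bm.1 then t + bm.2 else t) 0 - 1))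
      PySem.Dict.empty).keys = PySem.Set.ofList (rs.map pvNorm) := by
    have hk : ∀ (d : PySem.Dict (Int × Int × Int × Int) Int), d.keys = d.items.map (fun p => p.1) := by
      intro d; rfl
    rw [hk, hitems, List.map_map]
    simp [Function.comp_def]
  apply PySem.Dict.getD_of_mem_items
  · rw [hitems]
    exact List.mem_map_of_mem ((PySem.Set.mem_ofList (rs.map pvNorm) (pvNorm r)).mpr (List.mem_map_of_mem hr))
  · rw [hkeys]
    exact PySem.Set.nodup_ofList (rs.map pvNorm)

lemma pvCnt_nonneg (rs : List ((Int × Int) × (Int × Int))) (r : (Int × Int) × (Int × Int))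
    (h : r ∈ rs) : 0 ≤ pvCnt rs r := by
  have h1 : 0 < (rs.map pvNorm).countP (fun b => pvContains (pvNorm r) b) :=
    List.countP_pos_iff.mpr ⟨pvNorm r, List.mem_map_of_mem h, contains_self _⟩
  unfold pvCnt
  omega

-- ===== VERDICT (by name: the statement is the Claim_ definition above) =====
set_option maxHeartbeats 1000000 in
theorem find_max_containing_rectangle_spec : Claim_equal_find_max_containing_rectangle := by
  intro rs _
  unfold Spec_find_max_containing_rectangle
  cases rs with
  | nil => rfl
  | cons x t =>
    have hcount : ∀ ir ∈ PySem.List.enumerate (x :: t) 0,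
        (PySem.List.enumerate (x :: t)).foldl
          (fun (c : Int) jo => if (ir.1 != jo.1) && is_inside jo.2 ir.2 then c + 1 else c) 0
          = pvCnt (x :: t) ir.2 := by
      intro ir hm
      rw [PySem.List.foldl_count_if]
      have hpred : List.countP (fun jo => (ir.1 != jo.1) && is_inside jo.2 ir.2)
            (PySem.List.enumerate (x :: t) 0)
          = List.countP (fun jo => (ir.1 != jo.1) && pvContains (pvNorm ir.2) (pvNorm jo.2))
            (PySem.List.enumerate (x :: t) 0) := by
        apply List.countP_congr
        intro jo _
        rw [is_inside_eq]
      rw [hpred, count_enum (fun y => pvContains (pvNorm ir.2) (pvNorm y)) (x :: t) 0 ir.1 ir.2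
        (by simpa using hm) (contains_self _)]
      unfold pvCnt
      rw [List.countP_map]
      simp [Function.comp_def]
    have hcong : ∀ (st : Int × Option ((Int × Int) × (Int × Int))),
        ∀ ir ∈ PySem.List.enumerate (x :: t) 0,
        (fun (st : Int × Option ((Int × Int) × (Int × Int))) (ir : Int × ((Int × Int) × (Int × Int))) =>
          let count := (PySem.List.enumerate (x :: t)).foldl
            (fun (c : Int) jo => if (ir.1 != jo.1) && is_inside jo.2 ir.2 then c + 1 else c) 0
          if count > st.1 then (count, some ir.2)
          else if count = st.1 then
            match st.2 with
            | some b => if rectangle_area ir.2 > rectangle_area b then (st.1, some ir.2) else st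
            | none => st
          else st) st ir
        = pvStepA (pvCnt (x :: t)) (fun r => pvArea (pvNorm r)) st ir.2 := by
      intro st ir hm
      obtain ⟨mc, best⟩ := st
      simp only [hcount ir hm, area_eq, pvStepA]
      cases best <;> rfl
    have hA : find_max_containing_rectangle (x :: t)
        = (some (t.foldl (pvStep2 (pvCnt (x :: t)) (fun r => pvArea (pvNorm r))) x),
           pvCnt (x :: t) (t.foldl (pvStep2 (pvCnt (x :: t)) (fun r => pvArea (pvNorm r))) x)) := by
      simp only [find_max_containing_rectangle]
      rw [PySem.List.foldl_congr_mem _ _ _ _ hcong]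
      rw [foldl_enumerate_snd (pvStepA (pvCnt (x :: t)) (fun r => pvArea (pvNorm r)))
            (-1, none) (x :: t) 0]
      rw [List.foldl_cons]
      have h0 : pvStepA (pvCnt (x :: t)) (fun r => pvArea (pvNorm r)) (-1, none) x
          = (pvCnt (x :: t) x, some x) := by
        have hx := pvCnt_nonneg (x :: t) x List.mem_cons_self
        simp only [pvStepA]
        rw [if_pos (by omega : pvCnt (x :: t) x > (-1, (none : Option ((Int × Int) × (Int × Int)))).1)]
      rw [h0, runA (pvCnt (x :: t)) (fun r => pvArea (pvNorm r)) t x]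
    have hmult : ((x :: t).foldl
          (fun d r => d.insert (pvNorm r) (d.getD (pvNorm r) 0 + 1)) PySem.Dict.empty)
        = PySem.Dict.counter ((x :: t).map pvNorm) := by
      rw [← PySem.Dict.foldl_insert_getD_add_one_eq_counter, List.foldl_map]
    have hB : find_max_containing_rectangle_alt (x :: t)
        = (some (t.foldl (pvStep2 (pvCnt (x :: t)) (fun r => pvArea (pvNorm r))) x),
           pvCnt (x :: t) (t.foldl (pvStep2 (pvCnt (x :: t)) (fun r => pvArea (pvNorm r))) x)) := by
      simp only [find_max_containing_rectangle_alt]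
      rw [hmult]
      have hcongB : ∀ (st : Option ((Int × Int) × (Int × Int)) × Int × Int),
          ∀ r ∈ (x :: t),
          (fun (st : Option ((Int × Int) × (Int × Int)) × Int × Int) r =>
            let k := pvNorm r
            let c := ((PySem.Dict.counter ((x :: t).map pvNorm)).keys.foldl
              (fun c a => c.insert a
                ((PySem.Dict.counter ((x :: t).map pvNorm)).items.foldl
                  (fun (t : Int) bm => if pvContains a bm.1 then t + bm.2 else t) 0 - 1))
              PySem.Dict.empty).getD k 0
            let ar := (k.2.1 - k.1) * (k.2.2.2 - k.2.2.1)
            if c > st.2.1 ∨ (c = st.2.1 ∧ ar > st.2.2) then (some r, c, ar) else st) st r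
          = pvStepB (pvCnt (x :: t)) (fun r => pvArea (pvNorm r)) st r := by
        intro st r hr
        simp only [cnt_getD (x :: t) r hr, pvStepB, pvArea]
      rw [PySem.List.foldl_congr_mem _ _ _ _ hcongB]
      rw [List.foldl_cons]
      have h0 : pvStepB (pvCnt (x :: t)) (fun r => pvArea (pvNorm r)) (none, -1, -1) x
          = (some x, pvCnt (x :: t) x, pvArea (pvNorm x)) := by
        have hx := pvCnt_nonneg (x :: t) x List.mem_cons_self
        simp only [pvStepB]
        rw [if_pos (Or.inl (by omega : pvCnt (x :: t) x > (-1 : Int)))]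
      rw [h0, runB (pvCnt (x :: t)) (fun r => pvArea (pvNorm r)) t x]
    rw [hA, hB]
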